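-- pv_equiv track=rewrite | github.com/KonradMarzec1991/Codewars-LeetCode | Codewars/Python/6kyu/6kyu_Total Primes.py | get_total_primes
-- ===== SOURCE A (Python) =====
-- def get_total_primes(a, b):
--     import math
--     import itertools
--
--     def check_if_prime(num):
--         if num == 2 or num == 3:
--             return True
--         if num % 2 == 0 or num % 3 == 0:
--             return False
--         for i in range(3, int(math.sqrt(num))+1, 2):
--             if num % i == 0:
--                 return False
--         return True
--
--     arr, result = [], []
--     start, end = len(str(a)), len(str(b))
--     for i in range(start, end + 1):
--         for n in map(''.join, itertools.product('2357', repeat=i)):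
--             arr.append(int(n))
--     for d in arr:
--         if a <= d < b and check_if_prime(d):
--             result.append(d)
--     return len(result)
-- ===== SOURCE B (Python) =====
-- def get_total_primes(a, b):
--     import math
--
--     lo, hi = len(str(a)), len(str(b))
--     # one shared prime table up to isqrt(largest candidate), built by trial
--     # division against the primes found so far; every candidate is then tested
--     # against this table only (stop as soon as q*q > n), instead of A's per-number
--     # loop over all odd i up to sqrt.
--     top = int('7' * hi)
--     limit = math.isqrt(top)
--     primes = []
--
--     def has_listed_factor(n):
--         for q in primes:
--             if q * q > n:
--                 return False
--             if n % q == 0: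
--                 return True
--         return False
--
--     for p in range(2, limit + 1):
--         if not has_listed_factor(p):
--             primes.append(p)
--
--     # depth-first recursion over the digit tree rooted at 2,3,5,7, counting
--     # on the way down (no candidate list is ever materialised)
--     def dfs(n, length):
--         c = 1 if lo <= length and a <= n < b and not has_listed_factor(n) else 0
--         if length < hi:
--             for d in (2, 3, 5, 7):
--                 c += dfs(10 * n + d, length + 1)
--         return c
--
--     return dfs(2, 1) + dfs(3, 1) + dfs(5, 1) + dfs(7, 1)
-- ===== Notes on version B (the rewrite author's own statement) =====
-- stated objective: alternative
-- what changed: B replaces A's per-candidate odd trial division and itertools.product string enumeration by one shared prime table up to isqrt of the largest candidate (built once by trial division against earlier primes) used for all candidates, and a depth-first recursion over the digit tree that counts in-range primes on the way down without materialising any candidate or result list.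
import Mathlib
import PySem

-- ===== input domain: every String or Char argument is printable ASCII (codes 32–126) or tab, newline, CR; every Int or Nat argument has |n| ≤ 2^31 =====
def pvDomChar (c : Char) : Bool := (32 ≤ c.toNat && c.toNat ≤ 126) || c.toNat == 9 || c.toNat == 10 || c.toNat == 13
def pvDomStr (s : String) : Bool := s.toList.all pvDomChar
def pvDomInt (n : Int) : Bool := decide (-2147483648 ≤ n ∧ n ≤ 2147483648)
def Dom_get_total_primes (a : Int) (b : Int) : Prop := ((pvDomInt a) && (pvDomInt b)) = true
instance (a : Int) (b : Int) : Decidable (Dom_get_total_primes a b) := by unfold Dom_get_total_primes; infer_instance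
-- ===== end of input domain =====

-- B builds one shared prime table up to isqrt of the largest candidate and counts via a
-- depth-first recursion over the digit tree, instead of A's itertools.product enumeration
-- into lists with a fresh odd trial-division loop per candidate.


-- ===== PORT A =====

-- A's check_if_prime. int(math.sqrt(num)) is ported as Nat.sqrt: exact here, since the
-- helper is only reached with 2 ≤ num ≤ 2^31, where the float sqrt is correctly rounded
-- and its floor equals the integer square root.
def checkIfPrime (num : Int) : Bool :=
  if num == 2 || num == 3 then true
  else if PySem.Int.mod num 2 == 0 || PySem.Int.mod num 3 == 0 then false
  else !((PySem.List.pyRange 3 ((Nat.sqrt num.toNat : Int) + 1) 2).any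
          (fun i => PySem.Int.mod num i == 0))

-- itertools.product('2357', repeat=k): the documented equivalent
-- result = [[]]; for each of the k pools: result = [x+[y] for x in result for y in pool]
def pyProduct2357 : Nat → List (List Char)
  | 0 => [[]]
  | k + 1 => (pyProduct2357 k).flatMap (fun x => ['2', '3', '5', '7'].map (fun c => x ++ [c]))

-- int(''.join(t)): hand port of int() on its input domain here — nonempty strings of
-- ASCII digits (from '2357'), where it is exact (no sign/space/underscore cases arise).
def strVal (cs : List Char) : Int :=
  cs.foldl (fun acc c => 10 * acc + ((c.toNat : Int) - 48)) 0

def get_total_primes (a : Int) (b : Int) : Int :=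
  let start := PySem.Str.len (PySem.Int.toStr a)
  let stop := PySem.Str.len (PySem.Int.toStr b)
  -- repeat=i with i ≥ 1 always (string lengths are positive), so i.toNat is exact
  let arr := (PySem.List.pyRange start (stop + 1) 1).foldl
    (fun acc i => acc ++ (pyProduct2357 i.toNat).map strVal) []
  let result := arr.foldl
    (fun res d => if (decide (a ≤ d) && decide (d < b)) && checkIfPrime d then res ++ [d] else res) []
  (result.length : Int)

-- ===== PORT B =====

-- has_listed_factor(n): scan the shared prime list, early exit at q*q > n
def hasListedFactor (ps : List Int) (n : Int) : Bool :=
  match ps with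
  | [] => false
  | q :: qs =>
    if q * q > n then false
    else if PySem.Int.mod n q == 0 then true
    else hasListedFactor qs n

-- int('7' * hi): hand port, exact — the string is a nonempty run of the digit '7'
def rep7 : Nat → Int
  | 0 => 0
  | k + 1 => 10 * rep7 k + 7

-- for p in range(2, limit+1): if not has_listed_factor(p): primes.append(p)
def buildPrimes (limit : Int) : List Int :=
  (PySem.List.pyRange 2 (limit + 1) 1).foldl
    (fun ps p => if !hasListedFactor ps p then ps ++ [p] else ps) []

-- dfs(n, length); the recursion depth hi - length is the fuel argument
def dfsB (a b lo : Int) (ps : List Int) : Nat → Int → Int → Int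
  | 0, n, len =>
      if decide (lo ≤ len) && ((decide (a ≤ n) && decide (n < b)) && !hasListedFactor ps n) then 1 else 0
  | r + 1, n, len =>
      (if decide (lo ≤ len) && ((decide (a ≤ n) && decide (n < b)) && !hasListedFactor ps n) then 1 else 0)
      + dfsB a b lo ps r (10 * n + 2) (len + 1) + dfsB a b lo ps r (10 * n + 3) (len + 1)
      + dfsB a b lo ps r (10 * n + 5) (len + 1) + dfsB a b lo ps r (10 * n + 7) (len + 1)

def get_total_primes_alt (a : Int) (b : Int) : Int :=
  let lo := PySem.Str.len (PySem.Int.toStr a)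
  let hi := PySem.Str.len (PySem.Int.toStr b)
  let top := rep7 hi.toNat
  let limit := (Nat.sqrt top.toNat : Int)  -- math.isqrt(top), exact
  let ps := buildPrimes limit
  dfsB a b lo ps (hi - 1).toNat 2 1 + dfsB a b lo ps (hi - 1).toNat 3 1
    + dfsB a b lo ps (hi - 1).toNat 5 1 + dfsB a b lo ps (hi - 1).toNat 7 1

-- ===== PRECONDITION & SPEC =====
def Spec_get_total_primes (a : Int) (b : Int) (out : Int) : Prop := out = get_total_primes_alt a b
instance (a : Int) (b : Int) (out : Int) : Decidable (Spec_get_total_primes a b out) := by unfold Spec_get_total_primes; infer_instance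

-- ===== CLAIM (what is proved, stated in full; the proofs are below) =====
def Claim_equal_get_total_primes : Prop := ∀ (a : Int) (b : Int), Dom_get_total_primes a b → Spec_get_total_primes a b (get_total_primes a b)

-- ===== LEMMAS AND PROOFS =====

-- A-side: iterated frontier, counted from the seed [0] (one step yields [2,3,5,7])
def extIter : Nat → List Int
  | 0 => [0]
  | k + 1 => (extIter k).flatMap (fun n => ['2', '3', '5', '7'].map (fun c => 10 * n + ((c.toNat : Int) - 48)))

theorem strVal_append_singleton (x : List Char) (c : Char) :
    strVal (x ++ [c]) = 10 * strVal x + ((c.toNat : Int) - 48) := by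
  simp [strVal, List.foldl_append]

theorem map_strVal_pyProduct (k : Nat) :
    (pyProduct2357 k).map strVal = extIter k := by
  induction k with
  | zero => simp [pyProduct2357, extIter, strVal]
  | succ k ih =>
    simp only [pyProduct2357, extIter, ← ih,
      List.map_flatMap, List.flatMap_map, List.map_map]
    refine List.flatMap_congr ?_
    intro x _
    simp [Function.comp_def, strVal_append_singleton]

theorem len_toStr_pos (n : Int) : 1 ≤ PySem.Str.len (PySem.Int.toStr n) := by
  have h : (PySem.Int.toStr n).toList = PySem.Int.toChars n := PySem.Int.toList_toStr n
  rw [PySem.Str.len, h, PySem.Int.toChars]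
  split
  · simp
  · have := @Nat.length_toDigits_pos 10 n.toNat
    omega

-- ---- primality-test facts ----

theorem checkIfPrime_eq (n : Int) (h2 : 2 ≤ n) :
    checkIfPrime n = decide (Nat.Prime n.toNat) := by
  by_cases h23 : n = 2 ∨ n = 3
  · rcases h23 with rfl | rfl <;> decide
  · push Not at h23
    have h4 : 4 ≤ n := by
      rcases h23 with ⟨hn2, hn3⟩
      omega
    rw [checkIfPrime, if_neg (by simp; omega)]
    by_cases hd23 : PySem.Int.mod n 2 = 0 ∨ PySem.Int.mod n 3 = 0
    · rw [if_pos (by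
        simp only [beq_iff_eq, Bool.or_eq_true]
        exact hd23)]
      have hnp : ¬ Nat.Prime n.toNat := by
        rcases hd23 with h | h
        · have : (2 : Int) ∣ n := (PySem.Int.mod_eq_zero_iff_dvd n 2).mp h
          have h2' : 2 ∣ n.toNat := by
            rw [← Int.natCast_dvd_natCast]
            rwa [Int.toNat_of_nonneg (by omega)]
          intro hp
          rcases hp.eq_one_or_self_of_dvd 2 h2' with h1 | h1 <;> omega
        · have : (3 : Int) ∣ n := (PySem.Int.mod_eq_zero_iff_dvd n 3).mp h
          have h3' : 3 ∣ n.toNat := by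
            rw [← Int.natCast_dvd_natCast]
            rwa [Int.toNat_of_nonneg (by omega)]
          intro hp
          rcases hp.eq_one_or_self_of_dvd 3 h3' with h1 | h1 <;> omega
      simp [hnp]
    · push Not at hd23
      rw [if_neg (by
        simp only [beq_iff_eq, Bool.or_eq_true]
        rintro (h | h)
        exacts [hd23.1 h, hd23.2 h])]
      by_cases hpr : Nat.Prime n.toNat
      · simp only [hpr, decide_true]
        rw [Bool.not_eq_eq_eq_not, Bool.not_true]
        rw [List.any_eq_false]
        intro i hi
        obtain ⟨h3i, hilt, -⟩ := (PySem.List.mem_pyRange_iff_of_pos (by omega) i).mp hi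
        simp only [beq_iff_eq]
        intro hmod
        have hdvd : i ∣ n := (PySem.Int.mod_eq_zero_iff_dvd n i).mp hmod
        have hdvd' : i.toNat ∣ n.toNat := by
          rw [← Int.natCast_dvd_natCast]
          rwa [Int.toNat_of_nonneg (by omega), Int.toNat_of_nonneg (by omega)]
        have hsl : Nat.sqrt n.toNat < n.toNat := Nat.sqrt_lt_self (by omega)
        rcases hpr.eq_one_or_self_of_dvd i.toNat hdvd' with h1 | h1 <;> omega
      · simp only [hpr, decide_false]
        rw [Bool.not_eq_eq_eq_not, Bool.not_false, List.any_eq_true]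
        have hex : ∃ k, 2 ≤ k ∧ k ≤ Nat.sqrt n.toNat ∧ k ∣ n.toNat := by
          by_contra hno
          push Not at hno
          exact hpr (Nat.prime_def_le_sqrt.mpr ⟨by omega, fun m hm hms hd => hno m hm hms hd⟩)
        obtain ⟨k, hk2, hks, hkd⟩ := hex
        have hkdInt : (k : Int) ∣ n := by
          have := Int.natCast_dvd_natCast.mpr hkd
          rwa [Int.toNat_of_nonneg (by omega)] at this
        rcases Nat.even_or_odd k with he | ho
        · exfalso
          obtain ⟨k', rfl⟩ := he
          have h2n : (2 : Int) ∣ n := dvd_trans ⟨(k' : Int), by push_cast; ring⟩ hkdInt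
          exact hd23.1 ((PySem.Int.mod_eq_zero_iff_dvd n 2).mpr h2n)
        · have hk3 : 3 ≤ k := by
            rcases ho with ⟨k', rfl⟩
            omega
          refine ⟨(k : Int), ?_, ?_⟩
          · rw [PySem.List.mem_pyRange_iff_of_pos (by omega)]
            refine ⟨by exact_mod_cast hk3, by omega, ?_⟩
            obtain ⟨k', rfl⟩ := ho
            refine ⟨(k' : Int) - 1, by push_cast; ring⟩
          · simp [(PySem.Int.mod_eq_zero_iff_dvd n (k : Int)).mpr hkdInt]

theorem hasListedFactor_exists (ps : List Int) (n : Int)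
    (hpos : ∀ q ∈ ps, 2 ≤ q) (hs : ps.Pairwise (· < ·)) :
    hasListedFactor ps n = true ↔ ∃ q ∈ ps, q * q ≤ n ∧ q ∣ n := by
  induction ps with
  | nil => simp [hasListedFactor]
  | cons q qs ih =>
    rw [List.pairwise_cons] at hs
    have hq2 : 2 ≤ q := hpos q (by simp)
    by_cases hgt : q * q > n
    · rw [show hasListedFactor (q :: qs) n = false by simp [hasListedFactor, hgt]]
      simp only [Bool.false_eq_true, false_iff]
      rintro ⟨q', hq', hle, -⟩
      rcases List.mem_cons.mp hq' with rfl | hq'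
      · omega
      · have h1 : q < q' := hs.1 q' hq'
        nlinarith
    · by_cases hdvd : PySem.Int.mod n q = 0
      · rw [show hasListedFactor (q :: qs) n = true by simp [hasListedFactor, hgt, hdvd]]
        simp only [true_iff]
        exact ⟨q, by simp, by omega, (PySem.Int.mod_eq_zero_iff_dvd n q).mp hdvd⟩
      · rw [show hasListedFactor (q :: qs) n = hasListedFactor qs n by
          simp [hasListedFactor, hgt, hdvd]]
        rw [ih (fun x hx => hpos x (List.mem_cons_of_mem q hx)) hs.2]
        constructor
        · rintro ⟨q', hq', h⟩; exact ⟨q', List.mem_cons_of_mem q hq', h⟩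
        · rintro ⟨q', hq', hle, hd⟩
          rcases List.mem_cons.mp hq' with rfl | hq'
          · exact absurd ((PySem.Int.mod_eq_zero_iff_dvd n q').mpr hd) hdvd
          · exact ⟨q', hq', hle, hd⟩

theorem hasListedFactor_char (n : Int) (hn : 2 ≤ n) (ps : List Int)
    (hps : ∀ q ∈ ps, 2 ≤ q ∧ Nat.Prime q.toNat)
    (hcomp : ¬ Nat.Prime n.toNat → ((n.toNat.minFac : Nat) : Int) ∈ ps)
    (hs : ps.Pairwise (· < ·)) :
    hasListedFactor ps n = !decide (Nat.Prime n.toNat) := by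
  have hex := hasListedFactor_exists ps n (fun q hq => (hps q hq).1) hs
  by_cases hpr : Nat.Prime n.toNat
  · simp only [hpr, decide_true, Bool.not_true]
    rw [Bool.eq_false_iff]
    intro htrue
    obtain ⟨q, hq, hle, hd⟩ := hex.mp htrue
    obtain ⟨hq2, hqpr⟩ := hps q hq
    have hqn : q < n := by nlinarith
    have hd' : q.toNat ∣ n.toNat := by
      rw [← Int.natCast_dvd_natCast]
      rwa [Int.toNat_of_nonneg (by omega), Int.toNat_of_nonneg (by omega)]
    rcases (Nat.Prime.eq_one_or_self_of_dvd hpr q.toNat hd') with h1 | h1 <;> omega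
  · simp only [hpr, decide_false, Bool.not_false]
    apply hex.mpr
    have hn2 : 2 ≤ n.toNat := by omega
    have hmf := Nat.minFac_dvd n.toNat
    have hsq : n.toNat.minFac ^ 2 ≤ n.toNat := Nat.minFac_sq_le_self (by omega) hpr
    refine ⟨(n.toNat.minFac : Int), hcomp hpr, ?_, ?_⟩
    · have : (n.toNat.minFac : Int) * (n.toNat.minFac : Int) ≤ (n.toNat : Int) := by
        exact_mod_cast (by nlinarith [hsq] : n.toNat.minFac * n.toNat.minFac ≤ n.toNat)
      omega
    · have : (n.toNat.minFac : Int) ∣ (n.toNat : Int) := Int.natCast_dvd_natCast.mpr hmf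
      rwa [Int.toNat_of_nonneg (by omega)] at this

theorem build_loop (N : Nat) : ∀ (s t : Int) (ps : List Int), (t - s).toNat = N → 2 ≤ s → s ≤ t →
    (∀ q, q ∈ ps ↔ 2 ≤ q ∧ q < s ∧ Nat.Prime q.toNat) → ps.Pairwise (· < ·) →
    (∀ q, q ∈ (PySem.List.pyRange s t 1).foldl
        (fun ps p => if !hasListedFactor ps p then ps ++ [p] else ps) ps ↔
      2 ≤ q ∧ q < t ∧ Nat.Prime q.toNat) ∧
    ((PySem.List.pyRange s t 1).foldl
        (fun ps p => if !hasListedFactor ps p then ps ++ [p] else ps) ps).Pairwise (· < ·) := by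
  induction N with
  | zero =>
    intro s t ps hN h2 hst hmem hsort
    have : t = s := by omega
    subst this
    rw [PySem.List.pyRange_one_eq_nil le_rfl]
    exact ⟨hmem, hsort⟩
  | succ N ih =>
    intro s t ps hN h2 hst hmem hsort
    have hlt : s < t := by omega
    rw [PySem.List.pyRange_one_cons hlt, List.foldl_cons]
    have hch : hasListedFactor ps s = !decide (Nat.Prime s.toNat) := by
      refine hasListedFactor_char s h2 ps (fun q hq => ⟨((hmem q).mp hq).1, ((hmem q).mp hq).2.2⟩) ?_ hsort
      intro hnp
      rw [hmem]
      have h2n : 2 ≤ s.toNat := by omega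
      have hmfp : Nat.Prime s.toNat.minFac := Nat.minFac_prime (by omega)
      have hsq : s.toNat.minFac ^ 2 ≤ s.toNat := Nat.minFac_sq_le_self (by omega) hnp
      have h2m : 2 ≤ s.toNat.minFac := hmfp.two_le
      refine ⟨by exact_mod_cast h2m, ?_, by simpa using hmfp⟩
      have : s.toNat.minFac < s.toNat := by nlinarith
      omega
    by_cases hpr : Nat.Prime s.toNat
    · rw [show (if !hasListedFactor ps s then ps ++ [s] else ps) = ps ++ [s] by
        simp [hch, hpr]]
      refine ih (s+1) t (ps ++ [s]) (by omega) (by omega) (by omega) ?_ ?_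
      · intro q
        simp only [List.mem_append, List.mem_singleton, hmem]
        constructor
        · rintro (⟨hq2, hqs, hqp⟩ | rfl)
          · exact ⟨hq2, by omega, hqp⟩
          · exact ⟨h2, by omega, hpr⟩
        · rintro ⟨hq2, hqs, hqp⟩
          by_cases h : q = s
          · exact Or.inr h
          · exact Or.inl ⟨hq2, by omega, hqp⟩
      · rw [List.pairwise_append]
        refine ⟨hsort, List.pairwise_singleton _ _, ?_⟩
        intro x hx y hy
        rw [List.mem_singleton] at hy
        subst hy
        exact ((hmem x).mp hx).2.1
    · rw [show (if !hasListedFactor ps s then ps ++ [s] else ps) = ps by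
        simp [hch, hpr]]
      refine ih (s+1) t ps (by omega) (by omega) (by omega) ?_ hsort
      intro q
      rw [hmem]
      constructor
      · rintro ⟨hq2, hqs, hqp⟩; exact ⟨hq2, by omega, hqp⟩
      · rintro ⟨hq2, hqs, hqp⟩
        refine ⟨hq2, ?_, hqp⟩
        by_cases h : q = s
        · subst h; exact absurd hqp hpr
        · omega

theorem buildPrimes_spec (limit : Int) :
    (∀ q, q ∈ buildPrimes limit ↔ 2 ≤ q ∧ q ≤ limit ∧ Nat.Prime q.toNat) ∧
      (buildPrimes limit).Pairwise (· < ·) := by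
  unfold buildPrimes
  by_cases h : 2 ≤ limit + 1
  · have := build_loop (limit + 1 - 2).toNat 2 (limit + 1) [] rfl le_rfl h
      (by intro q; simp; omega) List.Pairwise.nil
    refine ⟨fun q => ?_, this.2⟩
    rw [this.1 q]
    constructor <;> rintro ⟨h1, h2, h3⟩ <;> exact ⟨h1, by omega, h3⟩
  · rw [PySem.List.pyRange_one_eq_nil (by omega)]
    refine ⟨fun q => ?_, List.Pairwise.nil⟩
    simp
    omega

-- ---- candidate bounds ----

theorem rep7_nonneg (k : Nat) : 0 ≤ rep7 k := by
  induction k with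
  | zero => simp [rep7]
  | succ k ih => simp only [rep7]; omega

theorem rep7_mono {j k : Nat} (h : j ≤ k) : rep7 j ≤ rep7 k := by
  induction k with
  | zero => simp_all
  | succ k ih =>
    rcases Nat.lt_or_ge j (k+1) with hl | hg
    · have := ih (by omega)
      have := rep7_nonneg k
      simp only [rep7]; omega
    · have : j = k + 1 := by omega
      simp [this]

theorem map_digits_eq (m : Int) :
    (['2', '3', '5', '7'] : List Char).map (fun c => 10 * m + ((c.toNat : Int) - 48))
      = [10 * m + 2, 10 * m + 3, 10 * m + 5, 10 * m + 7] := by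
  simp

theorem extIter_bounds (k : Nat) (n : Int) (hn : n ∈ extIter (k + 1)) :
    2 ≤ n ∧ n ≤ rep7 (k + 1) := by
  induction k generalizing n with
  | zero =>
    have h1 : extIter 1 = [2, 3, 5, 7] := by decide
    rw [h1] at hn
    fin_cases hn <;> decide
  | succ k ih =>
    obtain ⟨m, hm, hmem⟩ := List.mem_flatMap.mp hn
    obtain ⟨hm2, hm7⟩ := ih m hm
    rw [map_digits_eq] at hmem
    have h7 : rep7 (k + 1 + 1) = 10 * rep7 (k + 1) + 7 := rfl
    fin_cases hmem <;> constructor <;> omega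

-- ---- dfs characterisation ----

-- level j of the digit tree below n (j digit-append steps)
def descend (n : Int) : Nat → List Int
  | 0 => [n]
  | j + 1 => (descend n j).flatMap (fun m => [10 * m + 2, 10 * m + 3, 10 * m + 5, 10 * m + 7])

theorem descend_succ_eq (n : Int) (j : Nat) :
    descend n (j + 1) =
      [10 * n + 2, 10 * n + 3, 10 * n + 5, 10 * n + 7].flatMap (fun c => descend c j) := by
  induction j generalizing n with
  | zero => simp [descend]
  | succ j ih =>
    show (descend n (j+1)).flatMap _ = _
    rw [ih]
    simp [descend]

theorem flatMap_descend_extIter (j : Nat) :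
    ([2, 3, 5, 7] : List Int).flatMap (fun d => descend d j) = extIter (j + 1) := by
  induction j with
  | zero => simp [descend, extIter]
  | succ j ih =>
    have step : ∀ l : List Int,
        (l.flatMap fun d => descend d (j+1)) =
          (l.flatMap fun d => descend d j).flatMap
            (fun m => [10 * m + 2, 10 * m + 3, 10 * m + 5, 10 * m + 7]) := by
      intro l
      simp only [descend]
      exact (List.flatMap_assoc (l := l)).symm
    rw [step, ih]
    show _ = (extIter (j+1)).flatMap _
    refine List.flatMap_congr ?_
    intro m _
    exact (map_digits_eq m).symm

theorem dfsB_eq (a b lo : Int) (ps : List Int) (r : Nat) :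
    ∀ (n len : Int), dfsB a b lo ps r n len =
      ((List.range (r + 1)).map (fun j =>
        ((descend n j).countP (fun m =>
          decide (lo ≤ len + (j : Int)) &&
            ((decide (a ≤ m) && decide (m < b)) && !hasListedFactor ps m)) : Int))).sum := by
  induction r with
  | zero =>
    intro n len
    rw [show List.range (0 + 1) = [0] from rfl]
    simp only [dfsB, List.map_cons, List.map_nil, List.sum_cons, List.sum_nil,
      add_zero, Nat.cast_zero, descend, List.countP_cons, List.countP_nil]
    by_cases hc : (decide (lo ≤ len) && ((decide (a ≤ n) && decide (n < b)) && !hasListedFactor ps n)) = true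
    · simp [hc]
    · simp [hc]
  | succ r ih =>
    intro n len
    conv_rhs => rw [List.range_succ_eq_map, List.map_cons, List.sum_cons, List.map_map]
    simp only [Function.comp_def, Nat.succ_eq_add_one, descend_succ_eq, List.flatMap_cons,
      List.flatMap_nil, List.append_nil, List.countP_append, Nat.cast_add, Nat.cast_zero,
      Nat.cast_one, add_zero]
    simp only [show ∀ x : Int, len + (x + 1) = len + 1 + x from fun x => by ring]
    simp only [PySem.List.sum_map_add_int]
    simp only [dfsB]
    rw [ih, ih, ih, ih]
    simp only [descend, List.countP_cons, List.countP_nil]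
    push_cast
    by_cases hc : (decide (lo ≤ len) && ((decide (a ≤ n) && decide (n < b)) && !hasListedFactor ps n)) = true
    · simp only [hc, if_true]; ring
    · simp only [hc, if_false, Bool.false_eq_true]; ring


-- ---- sum reindexing ----

theorem reindex_sum (c : Int → Int) (lo : Int) (hlo : 1 ≤ lo) :
    ∀ (H : Nat),
      ((List.range H).map (fun j : Nat => if lo ≤ (j : Int) + 1 then c ((j : Int) + 1) else 0)).sum
        = ((PySem.List.pyRange lo ((H : Int) + 1) 1).map c).sum := by
  intro H
  induction H with
  | zero =>
    rw [show ((0 : Nat) : Int) + 1 = 1 by norm_num]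
    rw [PySem.List.pyRange_one_eq_nil (by omega : (1 : Int) ≤ lo)]
    simp
  | succ H ih =>
    rw [List.range_succ, List.map_append, List.sum_append, ih]
    by_cases h : lo ≤ (H : Int) + 1
    · rw [show ((H + 1 : Nat) : Int) + 1 = ((H : Int) + 1) + 1 by omega]
      rw [PySem.List.pyRange_one_succ_right h]
      simp [h]
    · rw [PySem.List.pyRange_one_eq_nil (by omega),
        PySem.List.pyRange_one_eq_nil (by omega)]
      simp [h]

theorem countP_flatMap_sum (p : Int → Bool) (l : List Int) (g : Int → List Int) :
    ((l.flatMap g).countP p : Int) = (l.map (fun x => ((g x).countP p : Int))).sum := by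
  induction l with
  | nil => simp
  | cons x xs ih => simp [List.countP_append, ih]

theorem four_countP (p : Int → Bool) (j : Nat) :
    ((descend 2 j).countP p : Int) + ((descend 3 j).countP p : Int)
      + ((descend 5 j).countP p : Int) + ((descend 7 j).countP p : Int)
    = ((extIter (j + 1)).countP p : Int) := by
  rw [← flatMap_descend_extIter]
  simp only [List.flatMap_cons, List.flatMap_nil, List.append_nil, List.countP_append]
  push_cast
  ring

-- ===== VERDICT (by name: the statement is the Claim_ definition above) =====
theorem get_total_primes_spec : Claim_equal_get_total_primes := by
  intro a b _
  unfold Spec_get_total_primes get_total_primes get_total_primes_alt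
  have hloPos := len_toStr_pos a
  have hhiPos := len_toStr_pos b
  simp only []
  -- A side: list-building collapsed to a per-length sum of counts
  rw [PySem.List.foldl_append_eq_flatMap]
  rw [PySem.List.foldl_append_if (fun d => (decide (a ≤ d) && decide (d < b)) && checkIfPrime d) (fun d : Int => d)]
  simp only [List.nil_append]
  rw [List.length_map, ← List.countP_eq_length_filter]
  simp only [map_strVal_pyProduct]
  rw [countP_flatMap_sum]
  -- B side: dfs sums collapsed to one per-length sum of counts
  rw [dfsB_eq, dfsB_eq, dfsB_eq, dfsB_eq]
  rw [← PySem.List.sum_map_add_int, ← PySem.List.sum_map_add_int, ← PySem.List.sum_map_add_int]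
  rw [show (PySem.Str.len (PySem.Int.toStr b) - 1).toNat + 1
      = (PySem.Str.len (PySem.Int.toStr b)).toNat by omega]
  obtain ⟨hmem, hsort⟩ := buildPrimes_spec
    ((Nat.sqrt (rep7 (PySem.Str.len (PySem.Int.toStr b)).toNat).toNat : Nat) : Int)
  rw [List.map_congr_left (f := fun j : Nat =>
        ((descend 2 j).countP (fun m => decide (PySem.Str.len (PySem.Int.toStr a) ≤ 1 + (j : Int)) &&
            ((decide (a ≤ m) && decide (m < b)) &&
              !hasListedFactor (buildPrimes ((Nat.sqrt (rep7 (PySem.Str.len (PySem.Int.toStr b)).toNat).toNat : Nat) : Int)) m)) : Int)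
        + _ + _ + _)
      (g := fun j : Nat =>
        if PySem.Str.len (PySem.Int.toStr a) ≤ (j : Int) + 1
        then ((extIter ((j : Int) + 1).toNat).countP
              (fun d => (decide (a ≤ d) && decide (d < b)) && checkIfPrime d) : Int)
        else 0) ?_]
  · rw [reindex_sum (fun i => ((extIter i.toNat).countP
        (fun d => (decide (a ≤ d) && decide (d < b)) && checkIfPrime d) : Int))
        (PySem.Str.len (PySem.Int.toStr a)) hloPos (PySem.Str.len (PySem.Int.toStr b)).toNat]
    rw [Int.toNat_of_nonneg (by omega : (0 : Int) ≤ PySem.Str.len (PySem.Int.toStr b))]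
  · intro j hj
    rw [List.mem_range] at hj
    beta_reduce
    rw [four_countP]
    by_cases hlj : PySem.Str.len (PySem.Int.toStr a) ≤ (j : Int) + 1
    · rw [if_pos hlj]
      rw [show ((j : Int) + 1).toNat = j + 1 by omega]
      congr 1
      apply List.countP_congr
      intro m hm
      obtain ⟨hm2, hm7⟩ := extIter_bounds j m hm
      have hchar : hasListedFactor
          (buildPrimes ((Nat.sqrt (rep7 (PySem.Str.len (PySem.Int.toStr b)).toNat).toNat : Nat) : Int)) m
          = !decide (Nat.Prime m.toNat) := by
        refine hasListedFactor_char m hm2 _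
          (fun q hq => ⟨((hmem q).mp hq).1, ((hmem q).mp hq).2.2⟩) ?_ hsort
        intro hnp
        rw [hmem]
        have h2n : 2 ≤ m.toNat := by omega
        have hmfp := Nat.minFac_prime (show m.toNat ≠ 1 by omega)
        have hsq : m.toNat.minFac ^ 2 ≤ m.toNat := Nat.minFac_sq_le_self (by omega) hnp
        have hle7 : m.toNat ≤ (rep7 (PySem.Str.len (PySem.Int.toStr b)).toNat).toNat := by
          have := rep7_mono (show j + 1 ≤ (PySem.Str.len (PySem.Int.toStr b)).toNat by omega)
          omega
        have hms : m.toNat.minFac ≤ Nat.sqrt (rep7 (PySem.Str.len (PySem.Int.toStr b)).toNat).toNat :=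
          le_trans (Nat.le_sqrt.mpr (by nlinarith)) (Nat.sqrt_le_sqrt hle7)
        refine ⟨by exact_mod_cast hmfp.two_le, by exact_mod_cast hms, by simpa using hmfp⟩
      simp only [show decide (PySem.Str.len (PySem.Int.toStr a) ≤ 1 + (j : Int)) = true from
        decide_eq_true (by omega), Bool.true_and]
      rw [checkIfPrime_eq m hm2, hchar]
      simp
    · rw [if_neg hlj]
      simp only [show decide (PySem.Str.len (PySem.Int.toStr a) ≤ 1 + (j : Int)) = false from
        decide_eq_false (by omega), Bool.false_and]
      simp
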